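-- pv_equiv track=rewrite | github.com/rdoherty2019/Computer_Programming | encode_decode.py | num_to_let
-- ===== SOURCE A (Python) =====
-- def num_to_let(string):
--     #set string accumlator
--     s = ''
--     #number string holder
--     num = ''
--     #iterate through
--     for i in string:
--         #Is the character in this string numeric?
--         if i.isnumeric():
--             #If it is add i to the empty string num
--             #If we have a two digit number we will add a second number
--             num += i
--         #The Dash is a stopper
--         elif i == '-':
--             #If a blank number string, say we had a special character of back to back dashes
--             if num  == '':
--                 #continue to next iteration
--                 continue
--             #If we have a two digit number, is it larger than our alaphabet?
--             elif int(num) > 26: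
--                 #if so reset string number holder
--                 num = ''
--                 #Continue to next iteration
--                 continue
--             #If I have a blank stirng number continue
--             if len(num) == 0:
--                 continue
--             #Otherwise, convert my string number holder to an index
--             idx = int(num)
--             #Convert it to a capital letter
--             s += chr(idx + 64)
--             #Reset number holde
--             num =''
--     #last iteration, it wont have a dash stopper to add it to the string
--     #but if its not a valid character it won't be added to the string num holder
--     if len(num) >0:
--         idx = int(num)
--         s += chr(idx + 64)
--         num = ''
--     return s
-- ===== SOURCE B (Python) =====
-- def num_to_let(string):
--     groups = string.split('-')
--     out = []
--     for g in groups[:-1]: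
--         num = ''.join(c for c in g if c.isnumeric())
--         if num and int(num) <= 26:
--             out.append(chr(int(num) + 64))
--     num = ''.join(c for c in groups[-1] if c.isnumeric())
--     if num:
--         out.append(chr(int(num) + 64))
--     return ''.join(out)
-- ===== Notes on version B (the rewrite author's own statement) =====
-- stated objective: simpler
-- what changed: Replaces A's character-by-character state machine (digit accumulator, dash-triggered flush with continue-laden branching, end-of-loop flush) by splitting on the dash and filtering digits per group: one letter per group, the >26 guard applied to all groups but the last, exactly as A behaves.
-- outside the precondition, e.g. on num_to_let('1114049'): A raises ValueError, B raises ValueError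
import Mathlib
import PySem

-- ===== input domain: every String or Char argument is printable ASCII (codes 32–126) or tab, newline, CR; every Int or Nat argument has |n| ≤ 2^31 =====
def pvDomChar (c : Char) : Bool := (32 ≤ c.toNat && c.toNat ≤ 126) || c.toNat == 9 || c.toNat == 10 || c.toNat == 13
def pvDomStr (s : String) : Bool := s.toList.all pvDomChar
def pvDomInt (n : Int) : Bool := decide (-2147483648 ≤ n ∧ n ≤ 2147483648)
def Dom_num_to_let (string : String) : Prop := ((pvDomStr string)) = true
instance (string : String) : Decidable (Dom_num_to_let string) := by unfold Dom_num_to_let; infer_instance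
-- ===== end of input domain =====

-- B rewrites A's character-by-character state machine as split('-') + per-group digit filtering: simpler decomposition, same value.
-- (On the ASCII domain str.isnumeric coincides with str.isdigit, so both ports use PySem isdigit.)

-- shared helpers: int(num) and chr(n) as both Pythons use them
-- int(num) where num is the accumulated digit string (always parses; getD 0 never taken on digits)
def pvVal (num : List Char) : Int := (PySem.Int.ofChars? num).getD 0
-- chr(n) for a valid code point; outside Pre_ (invalid code point) Python chr raises or yields a
-- surrogate unrepresentable as a Lean Char — there pvChr returns NUL, and nothing is claimed.
def pvChr (n : Int) : List Char := [Char.ofNat n.toNat]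

-- ===== PORT A =====
def numToLetLoop (cs : List Char) (s num : List Char) : List Char :=
  match cs with
  | [] => if num.length > 0 then s ++ pvChr (pvVal num + 64) else s
  | i :: rest =>
    if PySem.Chars.isdigit i then numToLetLoop rest s (num ++ [i])
    else if i = '-' then
      if num = [] then numToLetLoop rest s num
      else if pvVal num > 26 then numToLetLoop rest s []
      else if num.length = 0 then numToLetLoop rest s num
      else numToLetLoop rest (s ++ pvChr (pvVal num + 64)) []
    else numToLetLoop rest s num

def num_to_let (string : String) : String := String.mk (numToLetLoop string.toList [] [])

-- ===== PORT B =====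
-- the loop body of Source B's for-loop over groups[:-1]
def pvStep (out : List Char) (g : List Char) : List Char :=
  let num := g.filter PySem.Chars.isdigit
  if num ≠ [] ∧ pvVal num ≤ 26 then out ++ pvChr (pvVal num + 64) else out

def num_to_let_alt (string : String) : String :=
  let groups := PySem.Chars.splitOn string.toList ['-']
  let out := groups.dropLast.foldl pvStep []
  let num := (groups.getLastD []).filter PySem.Chars.isdigit
  String.mk (if num ≠ [] then out ++ pvChr (pvVal num + 64) else out)

-- ===== PRECONDITION & SPEC =====
-- Pre_ excludes strings whose trailing dash-free group's digits decode to v with v+64 not a valid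
-- Unicode scalar: for v+64 > 0x10FFFF Python's chr raises ValueError in both programs, and for
-- v+64 in the surrogate range 0xD800–0xDFFF both Pythons return a lone-surrogate string that has
-- no representation as a Lean String.
def Pre_num_to_let (string : String) : Prop :=
  let num := ((string.toList.reverse.takeWhile (· ≠ '-')).reverse).filter PySem.Chars.isdigit
  num = [] ∨ Nat.isValidChar ((pvVal num + 64).toNat)
instance (string : String) : Decidable (Pre_num_to_let string) := by unfold Pre_num_to_let; infer_instance
def pvWitness_num_to_let : String := "8-5-12--12x-15-"

def Spec_num_to_let (string : String) (out : String) : Prop := out = num_to_let_alt string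
instance (string : String) (out : String) : Decidable (Spec_num_to_let string out) := by unfold Spec_num_to_let; infer_instance

-- ===== CLAIM (what is proved, stated in full; the proofs are below) =====
def Claim_equal_num_to_let : Prop := ∀ (string : String), Dom_num_to_let string → Pre_num_to_let string → Spec_num_to_let string (num_to_let string)

-- ===== LEMMAS AND PROOFS =====

-- digits of a group
def pvDigits (g : List Char) : List Char := g.filter PySem.Chars.isdigit
-- letter emitted for a dash-terminated group / for the trailing group
def pvEmitMid (num : List Char) : List Char :=
  if num ≠ [] ∧ pvVal num ≤ 26 then pvChr (pvVal num + 64) else []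
def pvEmitLast (num : List Char) : List Char :=
  if num ≠ [] then pvChr (pvVal num + 64) else []

-- A's loop, abstracted from the output accumulator
def pvP : List Char → List Char → List Char
  | [], num => pvEmitLast num
  | c :: cs, num =>
    if PySem.Chars.isdigit c then pvP cs (num ++ [c])
    else if c = '-' then pvEmitMid num ++ pvP cs []
    else pvP cs num

-- structural version of string.split('-')
def pvSplit : List Char → List (List Char)
  | [] => [[]]
  | c :: cs =>
    if c = '-' then [] :: pvSplit cs
    else match pvSplit cs with
      | [] => [[c]]
      | g :: gs => (c :: g) :: gs

-- B's group loop as a recursion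
def pvQ : List (List Char) → List Char → List Char
  | [], num => pvEmitLast num
  | [g], num => pvEmitLast (num ++ pvDigits g)
  | g :: g' :: gs, num => pvEmitMid (num ++ pvDigits g) ++ pvQ (g' :: gs) []

def pvMapHead (f : List Char → List Char) : List (List Char) → List (List Char)
  | [] => []
  | g :: gs => f g :: gs

theorem pvSplit_ne_nil (cs : List Char) : pvSplit cs ≠ [] := by
  cases cs with
  | nil => simp [pvSplit]
  | cons c cs =>
    simp only [pvSplit]
    split
    · simp
    · split <;> simp

theorem numToLetLoop_eq_pvP (cs : List Char) : ∀ s num, numToLetLoop cs s num = s ++ pvP cs num := by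
  induction cs with
  | nil =>
    intro s num
    cases num <;> simp [numToLetLoop, pvP, pvEmitLast]
  | cons c cs ih =>
    intro s num
    simp only [numToLetLoop, pvP]
    by_cases hd : PySem.Chars.isdigit c = true
    · simp [hd, ih]
    · simp only [hd, if_false, Bool.false_eq_true]
      by_cases hc : c = '-'
      · simp only [hc]
        by_cases hn : num = []
        · subst hn
          simp [pvEmitMid, ih]
        · simp only [if_neg hn]
          by_cases h26 : pvVal num > 26
          · have : ¬ (num ≠ [] ∧ pvVal num ≤ 26) := by
              rintro ⟨-, h⟩; omega
            simp [if_pos h26, ih, pvEmitMid, this]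
          · have hlen : ¬ num.length = 0 := by
              cases num with
              | nil => exact absurd rfl hn
              | cons a l => simp
            have h26' : pvVal num ≤ 26 := by omega
            simp [if_neg h26, ih, pvEmitMid, hn, h26']
      · simp only [if_neg hc, ih]

theorem pvP_eq_pvQ (cs : List Char) : ∀ num, pvP cs num = pvQ (pvSplit cs) num := by
  induction cs with
  | nil =>
    intro num
    simp [pvP, pvSplit, pvQ, pvDigits]
  | cons c cs ih =>
    intro num
    simp only [pvP, pvSplit]
    by_cases hc : c = '-'
    · subst hc
      have hd : PySem.Chars.isdigit '-' = false := by decide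
      obtain ⟨g, gs, hgs⟩ : ∃ g gs, pvSplit cs = g :: gs := by
        cases h : pvSplit cs with
        | nil => exact absurd h (pvSplit_ne_nil cs)
        | cons g gs => exact ⟨g, gs, rfl⟩
      simp [hd, hgs, pvQ, pvDigits, ih]
    · obtain ⟨g, gs, hgs⟩ : ∃ g gs, pvSplit cs = g :: gs := by
        cases h : pvSplit cs with
        | nil => exact absurd h (pvSplit_ne_nil cs)
        | cons g gs => exact ⟨g, gs, rfl⟩
      by_cases hd : PySem.Chars.isdigit c = true
      · simp only [hd, if_true, if_neg hc, hgs, ih]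
        cases gs with
        | nil => simp [pvQ, pvDigits, hd]
        | cons g' gs' => simp [pvQ, pvDigits, hd]
      · simp only [hd, Bool.false_eq_true, if_false, if_neg hc, hgs, ih]
        cases gs with
        | nil => simp [pvQ, pvDigits, hd]
        | cons g' gs' => simp [pvQ, pvDigits, hd]

theorem pvMapHead_id (gs : List (List Char)) : pvMapHead (fun g => g) gs = gs := by
  cases gs <;> simp [pvMapHead]

theorem splitOn_go_spec (fuel : Nat) :
    ∀ (l cur : List Char) (accs : List (List Char)), l.length < fuel →
      PySem.Chars.splitOn.go ['-'] fuel l cur accs = accs.reverse ++ pvMapHead (cur.reverse ++ ·) (pvSplit l) := by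
  induction fuel with
  | zero => intro l cur accs h; omega
  | succ fuel ih =>
    intro l cur accs h
    cases l with
    | nil =>
      rw [PySem.Chars.splitOn.go]
      simp [pvSplit, pvMapHead]
      omega
    | cons c rest =>
      rw [PySem.Chars.splitOn.go]
      have hlen : rest.length < fuel := by simpa using Nat.lt_of_succ_lt_succ h
      by_cases hc : c = '-'
      · subst hc
        simp only [List.isPrefixOf, BEq.rfl, Bool.true_and, if_true]
        have hdrop : List.drop (['-'] : List Char).length ('-' :: rest) = rest := rfl
        rw [hdrop, ih rest [] (cur.reverse :: accs) hlen]
        obtain ⟨g, gs, hgs⟩ : ∃ g gs, pvSplit rest = g :: gs := by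
          cases hh : pvSplit rest with
          | nil => exact absurd hh (pvSplit_ne_nil rest)
          | cons g gs => exact ⟨g, gs, rfl⟩
        simp [pvSplit, hgs, pvMapHead]
      · have hpre : (['-'] : List Char).isPrefixOf (c :: rest) = false := by
          simp [List.isPrefixOf]
          exact fun hh => absurd hh.symm hc
        simp only [hpre, Bool.false_eq_true, if_false]
        rw [ih rest (c :: cur) accs hlen]
        obtain ⟨g, gs, hgs⟩ : ∃ g gs, pvSplit rest = g :: gs := by
          cases hh : pvSplit rest with
          | nil => exact absurd hh (pvSplit_ne_nil rest)
          | cons g gs => exact ⟨g, gs, rfl⟩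
        simp [pvSplit, hgs, pvMapHead, hc]

theorem splitOn_eq_pvSplit (cs : List Char) : PySem.Chars.splitOn cs ['-'] = pvSplit cs := by
  show PySem.Chars.splitOn.go ['-'] (cs.length + 1) cs [] [] = pvSplit cs
  rw [splitOn_go_spec (cs.length + 1) cs [] [] (Nat.lt_succ_self _)]
  simp [pvMapHead_id]

theorem pvStep_eq (out g : List Char) : pvStep out g = out ++ pvEmitMid (pvDigits g) := by
  simp only [pvStep, pvEmitMid, pvDigits]
  split <;> simp

theorem b_fold_eq (gs : List (List Char)) : ∀ out, gs ≠ [] →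
    (if (gs.getLastD []).filter PySem.Chars.isdigit ≠ [] then
        gs.dropLast.foldl pvStep out ++ pvChr (pvVal ((gs.getLastD []).filter PySem.Chars.isdigit) + 64)
      else gs.dropLast.foldl pvStep out) = out ++ pvQ gs [] := by
  induction gs with
  | nil => intro out h; exact absurd rfl h
  | cons g gs ih =>
    intro out _
    cases gs with
    | nil =>
      simp only [List.getLastD, List.dropLast, List.foldl, pvQ, pvEmitLast, List.nil_append, pvDigits]
      split <;> simp_all
    | cons g' gs' =>
      have hne : (g' :: gs' : List (List Char)) ≠ [] := by simp
      have := ih (pvStep out g) hne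
      simp only [List.getLastD_cons, List.dropLast_cons₂, List.foldl_cons] at *
      rw [this, pvStep_eq]
      simp [pvQ, pvDigits]

-- ===== VERDICT (by name: the statement is the Claim_ definition above) =====
theorem num_to_let_spec : Claim_equal_num_to_let := by
  intro s _ _
  unfold Spec_num_to_let num_to_let num_to_let_alt
  rw [numToLetLoop_eq_pvP, pvP_eq_pvQ, splitOn_eq_pvSplit]
  simp only [List.nil_append]
  have h := b_fold_eq (pvSplit s.toList) [] (pvSplit_ne_nil s.toList)
  simp only [List.nil_append] at h
  rw [h]
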